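-- pv_equiv track=rewrite | github.com/BornaBejuk/bioinf-kiwi | python/proba_puta.py | connect_into_fasta
-- ===== SOURCE A (Python) =====
-- def getLast(put):
--     return put[-1]
--
-- def getFirst(put):
--     return put[0]
--
-- def connect_into_fasta(reads):
--     #length = 0
--     path0 = []
--     paths1 = []
--     paths2 = []
--     # turn input into a list
--
--     for i in reads:
--         path0.append([i[0], i[1]])
--         path0.append([i[1], i[0]])
--
--     paths1 = path0[:]
--     while True: # maybe while lenght < expected_length
--         for i in range(len(paths1)):
--             for j in range(len(path0)):
--                 if getLast(paths1[i]) == getFirst(path0[j]) and getLast(path0[j]) not in paths1[i]: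
--                     paths2.append(paths1[i] + [getLast(path0[j])])
--         if len(paths2) == 0:
--             break
--         paths1 = paths2
--         paths2 = []
--
--     result = []
--     for i in paths1:
--         if i not in result:
--             if i[::-1] not in result:
--                 result.append(i)
--     return result
-- ===== SOURCE B (Python) =====
-- def connect_into_fasta(reads):
--     # Same output as A: all maximum-length simple paths over the read-overlap edges,
--     # found by recursive DFS in edge order instead of level-by-level BFS recopying.
--     edges = []
--     for r in reads:
--         edges.append([r[0], r[1]])
--         edges.append([r[1], r[0]])
--
--     all_paths = []
--
--     def dfs(path):
--         all_paths.append(path)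
--         for e in edges:
--             if path[-1] == e[0] and e[1] not in path:
--                 dfs(path + [e[1]])
--
--     for e in edges:
--         dfs(e)
--
--     best = max((len(p) for p in all_paths), default=0)
--     result = []
--     for p in all_paths:
--         if len(p) == best and p not in result and p[::-1] not in result:
--             result.append(p)
--     return result
-- ===== Notes on version B (the rewrite author's own statement) =====
-- stated objective: alternative
-- what changed: Replaces A's while-loop BFS that rebuilds and re-extends the whole list of current paths level by level with a recursive DFS over the same directed edge list that enumerates every simple path once in pre-order, then keeps the maximum-length paths and runs the same exact-and-reversed dedup; output is identical because DFS pre-order restricted to maximum-length paths coincides with the final BFS level order.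
import Mathlib
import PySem

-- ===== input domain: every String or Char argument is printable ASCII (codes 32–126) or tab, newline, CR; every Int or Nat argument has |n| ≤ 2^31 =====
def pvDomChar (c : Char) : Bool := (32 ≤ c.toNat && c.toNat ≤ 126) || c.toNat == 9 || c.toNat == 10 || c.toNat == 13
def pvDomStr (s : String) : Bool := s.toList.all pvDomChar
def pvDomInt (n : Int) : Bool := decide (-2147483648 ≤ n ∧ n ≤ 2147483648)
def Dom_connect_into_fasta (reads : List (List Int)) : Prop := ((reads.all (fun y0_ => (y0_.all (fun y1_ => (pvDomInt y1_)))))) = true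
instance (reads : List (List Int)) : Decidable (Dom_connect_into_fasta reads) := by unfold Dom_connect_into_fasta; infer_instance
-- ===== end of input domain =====

-- B replaces A's level-by-level BFS re-extension of all paths with a recursive DFS in edge
-- order that collects every simple path once and keeps the maximum-length ones (objective:
-- alternative decomposition, same exact output).


-- ===== PORT A =====
-- getLast(put) = put[-1]; getFirst(put) = put[0] (always in range on the lists A builds)
def pvGetLast (put : List Int) : Int := (PySem.List.pyGet? put (-1)).getD 0
def pvGetFirst (put : List Int) : Int := (PySem.List.pyGet? put 0).getD 0

-- the first for-loop: path0.append([i[0], i[1]]); path0.append([i[1], i[0]])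
def pvEdgesA (reads : List (List Int)) : List (List Int) :=
  reads.foldl (fun acc i =>
    (acc ++ [[(PySem.List.pyGet? i 0).getD 0, (PySem.List.pyGet? i 1).getD 0]]) ++
      [[(PySem.List.pyGet? i 1).getD 0, (PySem.List.pyGet? i 0).getD 0]]) []

-- one round of the while-loop body: the two nested for-loops filling paths2
def pvStepA (path0 : List (List Int)) (paths1 : List (List Int)) : List (List Int) :=
  paths1.foldl (fun acc p =>
    path0.foldl (fun acc2 e =>
      if pvGetLast p = pvGetFirst e ∧ pvGetLast e ∉ p then acc2 ++ [p ++ [pvGetLast e]] else acc2)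
      acc) []

-- the while True loop; fuel is a totality guard only: the loop always breaks within
-- (number of node occurrences + 2) rounds, as the proofs below show
def pvLoopA (path0 : List (List Int)) (paths1 : List (List Int)) : Nat → List (List Int)
  | 0 => paths1
  | fuel+1 =>
    let paths2 := pvStepA path0 paths1
    if paths2 = [] then paths1 else pvLoopA path0 paths2 fuel

def connect_into_fasta (reads : List (List Int)) : List (List Int) :=
  let path0 := pvEdgesA reads
  let paths1 := pvLoopA path0 path0 ((path0.flatMap (fun e => e)).length + 2)
  -- the final dedup loop; i[::-1] is exactly List.reverse
  paths1.foldl (fun res i =>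
    if i ∈ res then res else if i.reverse ∈ res then res else res ++ [i]) []

-- ===== PORT B =====
-- dfs(path): record path, then recurse on every edge-order extension by a fresh node.
-- fuel is a totality guard only: it never runs out on the calls made below (proved)
def pvDfs (edges : List (List Int)) : Nat → List Int → List (List Int)
  | 0, path => [path]
  | fuel+1, path =>
      path :: edges.flatMap (fun e =>
        if (PySem.List.pyGet? path (-1)).getD 0 = (PySem.List.pyGet? e 0).getD 0 ∧
            (PySem.List.pyGet? e 1).getD 0 ∉ path
        then pvDfs edges fuel (path ++ [(PySem.List.pyGet? e 1).getD 0]) else [])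

def connect_into_fasta_alt (reads : List (List Int)) : List (List Int) :=
  -- edges = [e for r in reads for e in ([r[0], r[1]], [r[1], r[0]])]
  let edges := reads.flatMap (fun r =>
    [[(PySem.List.pyGet? r 0).getD 0, (PySem.List.pyGet? r 1).getD 0],
     [(PySem.List.pyGet? r 1).getD 0, (PySem.List.pyGet? r 0).getD 0]])
  let allPaths := edges.flatMap (fun e => pvDfs edges ((edges.flatMap (fun x => x)).length + 2) e)
  -- best = max((len(p) for p in all_paths), default=0)
  let best := allPaths.foldl (fun m p => max m p.length) 0
  -- the single filtering dedup pass; p[::-1] is exactly List.reverse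
  allPaths.foldl (fun res p =>
    if p.length = best ∧ p ∉ res ∧ p.reverse ∉ res then res ++ [p] else res) []

-- ===== PRECONDITION & SPEC =====
-- Pre_ excludes exactly the inputs on which Python A raises IndexError: a read with fewer
-- than two entries (A reads i[0] and i[1] of every read).
def Pre_connect_into_fasta (reads : List (List Int)) : Prop := ∀ r ∈ reads, 2 ≤ r.length
instance (reads : List (List Int)) : Decidable (Pre_connect_into_fasta reads) := by
  unfold Pre_connect_into_fasta; infer_instance

def pvWitness_connect_into_fasta : List (List Int) := [[1, 2], [2, 3]]

def Spec_connect_into_fasta (reads : List (List Int)) (out : List (List Int)) : Prop := out = connect_into_fasta_alt reads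
instance (reads : List (List Int)) (out : List (List Int)) : Decidable (Spec_connect_into_fasta reads out) := by unfold Spec_connect_into_fasta; infer_instance

-- ===== CLAIM (what is proved, stated in full; the proofs are below) =====
def Claim_equal_connect_into_fasta : Prop := ∀ (reads : List (List Int)), Dom_connect_into_fasta reads → Pre_connect_into_fasta reads → Spec_connect_into_fasta reads (connect_into_fasta reads)

-- ===== LEMMAS AND PROOFS =====

-- one-step extensions of a path p by the edges of E, in edge order
def pvExt (E : List (List Int)) (p : List Int) : List (List Int) :=
  E.flatMap (fun e => if pvGetLast p = pvGetFirst e ∧ pvGetLast e ∉ p then [p ++ [pvGetLast e]] else [])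

-- the k-th BFS level grown from the path list S
def pvLev (E : List (List Int)) : List (List Int) → Nat → List (List Int)
  | S, 0 => S
  | S, k+1 => pvLev E (S.flatMap (pvExt E)) k

-- the k-th level of descendants of a single path p
def pvLevFrom (E : List (List Int)) : Nat → List Int → List (List Int)
  | 0, p => [p]
  | k+1, p => (pvExt E p).flatMap (pvLevFrom E k)

-- every edge has shape [a, b]
def pvGoodE (E : List (List Int)) : Prop := ∀ e ∈ E, ∃ a b, e = [a, b]

-- invariant of every path the programs build: after the first node, nodes are distinct
-- and drawn from the node occurrences of E
def pvInv (E : List (List Int)) (p : List Int) : Prop :=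
  (p.drop 1).Nodup ∧ ∀ x ∈ p.drop 1, x ∈ E.flatMap (fun e => e)

theorem pvFlatMap_congr {α β : Type} {l : List α} {f g : α → List β}
    (h : ∀ x ∈ l, f x = g x) : l.flatMap f = l.flatMap g := by
  induction l with
  | nil => rfl
  | cons a t ih =>
    simp only [List.flatMap_cons]
    rw [h a (by simp), ih (fun x hx => h x (by simp [hx]))]

theorem pvFlatMap_empty {α β : Type} (l : List α) :
    l.flatMap (fun _ => ([] : List β)) = [] := by
  induction l <;> simp_all

theorem pvGetLast_pair (a b : Int) : pvGetLast [a, b] = b := by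
  simp [pvGetLast, PySem.List.pyGet?, PySem.List.pyIdx?]

theorem pvGetFirst_pair (a b : Int) : pvGetFirst [a, b] = a := by
  simp [pvGetFirst, PySem.List.pyGet?, PySem.List.pyIdx?]

theorem pvEdgesA_gen (reads : List (List Int)) (acc : List (List Int)) :
    reads.foldl (fun acc i =>
      (acc ++ [[(PySem.List.pyGet? i 0).getD 0, (PySem.List.pyGet? i 1).getD 0]]) ++
        [[(PySem.List.pyGet? i 1).getD 0, (PySem.List.pyGet? i 0).getD 0]]) acc
      = acc ++ reads.flatMap (fun r =>
          [[(PySem.List.pyGet? r 0).getD 0, (PySem.List.pyGet? r 1).getD 0],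
           [(PySem.List.pyGet? r 1).getD 0, (PySem.List.pyGet? r 0).getD 0]]) := by
  induction reads generalizing acc with
  | nil => simp
  | cons r t ih =>
    rw [List.foldl_cons, ih, List.flatMap_cons]
    simp

theorem pvEdgesA_eq (reads : List (List Int)) :
    pvEdgesA reads = reads.flatMap (fun r =>
      [[(PySem.List.pyGet? r 0).getD 0, (PySem.List.pyGet? r 1).getD 0],
       [(PySem.List.pyGet? r 1).getD 0, (PySem.List.pyGet? r 0).getD 0]]) := by
  unfold pvEdgesA
  rw [pvEdgesA_gen, List.nil_append]

theorem pvEdgesA_good (reads : List (List Int)) : pvGoodE (pvEdgesA reads) := by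
  intro e he
  rw [pvEdgesA_eq, List.mem_flatMap] at he
  obtain ⟨r, _, he⟩ := he
  simp only [List.mem_cons, List.not_mem_nil, or_false] at he
  rcases he with h | h
  · exact ⟨_, _, h⟩
  · exact ⟨_, _, h⟩

theorem pvInner (p : List Int) (E : List (List Int)) (acc : List (List Int)) :
    E.foldl (fun acc2 e =>
      if pvGetLast p = pvGetFirst e ∧ pvGetLast e ∉ p then acc2 ++ [p ++ [pvGetLast e]] else acc2)
      acc = acc ++ pvExt E p := by
  induction E generalizing acc with
  | nil => simp [pvExt]
  | cons e t ih =>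
    simp only [List.foldl_cons]
    by_cases h : pvGetLast p = pvGetFirst e ∧ pvGetLast e ∉ p
    · rw [if_pos h, ih]
      simp [pvExt, h]
    · rw [if_neg h, ih]
      simp [pvExt, h]

theorem pvStepA_gen (E : List (List Int)) (l : List (List Int)) (acc : List (List Int)) :
    l.foldl (fun acc p =>
      E.foldl (fun acc2 e =>
        if pvGetLast p = pvGetFirst e ∧ pvGetLast e ∉ p then acc2 ++ [p ++ [pvGetLast e]] else acc2)
        acc) acc
      = acc ++ l.flatMap (pvExt E) := by
  induction l generalizing acc with
  | nil => simp
  | cons p t ih =>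
    simp only [List.foldl_cons, List.flatMap_cons]
    rw [pvInner, ih, List.append_assoc]

theorem pvStepA_eq (E l : List (List Int)) : pvStepA E l = l.flatMap (pvExt E) := by
  unfold pvStepA
  rw [pvStepA_gen, List.nil_append]

theorem pvLev_succ_back (E : List (List Int)) : ∀ (k : Nat) (S : List (List Int)),
    pvLev E S (k+1) = (pvLev E S k).flatMap (pvExt E) := by
  intro k
  induction k with
  | zero => intro S; rfl
  | succ k ih => intro S; exact ih (S.flatMap (pvExt E))

theorem pvFlatMap_levFrom (E : List (List Int)) : ∀ (k : Nat) (S : List (List Int)),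
    S.flatMap (pvLevFrom E k) = pvLev E S k := by
  intro k
  induction k with
  | zero => intro S; simp [pvLevFrom, pvLev]
  | succ k ih =>
    intro S
    show S.flatMap (fun p => (pvExt E p).flatMap (pvLevFrom E k)) = pvLev E (S.flatMap (pvExt E)) k
    rw [← List.flatMap_assoc, ih]

theorem pvExt_mem {E : List (List Int)} (hE : pvGoodE E) {p q : List Int} (hq : q ∈ pvExt E p) :
    ∃ y, y ∉ p ∧ y ∈ E.flatMap (fun e => e) ∧ q = p ++ [y] := by
  simp only [pvExt, List.mem_flatMap] at hq
  obtain ⟨e, he, hq⟩ := hq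
  by_cases h : pvGetLast p = pvGetFirst e ∧ pvGetLast e ∉ p
  · rw [if_pos h] at hq
    simp only [List.mem_singleton] at hq
    obtain ⟨a, b, rfl⟩ := hE e he
    rw [pvGetLast_pair] at hq h
    refine ⟨b, h.2, ?_, hq⟩
    exact List.mem_flatMap.2 ⟨[a, b], he, by simp⟩
  · rw [if_neg h] at hq
    simp at hq

theorem pvInv_length {E : List (List Int)} {p : List Int} (h : pvInv E p) :
    p.length ≤ ((E.flatMap (fun e => e)).length) + 1 := by
  obtain ⟨hnd, hsub⟩ := h
  have hsub' : p.drop 1 ⊆ E.flatMap (fun e => e) := by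
    intro x hx
    exact hsub x hx
  have h2 := (List.Nodup.subperm hnd hsub').length_le
  have h3 : p.length ≤ (p.drop 1).length + 1 := by cases p <;> simp
  omega

theorem pvInv_append {E : List (List Int)} {p : List Int} {y : Int}
    (h : pvInv E p) (hy : y ∉ p) (hyn : y ∈ E.flatMap (fun e => e)) : pvInv E (p ++ [y]) := by
  obtain ⟨hnd, hsub⟩ := h
  cases p with
  | nil => exact ⟨by simp, by simp⟩
  | cons a t =>
    have hyt : y ∉ t := fun hm => hy (by simp [hm])
    have hnd' : t.Nodup := by simpa using hnd
    refine ⟨?_, ?_⟩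
    · show (t ++ [y]).Nodup
      simp [List.nodup_append, hnd']
      exact fun a ha hay => hyt (hay ▸ ha)
    · intro x hx
      rcases List.mem_append.1 hx with hx | hx
      · exact hsub x (by simpa using hx)
      · simp only [List.mem_singleton] at hx
        subst hx; exact hyn

theorem pvLevFrom_props {E : List (List Int)} (hE : pvGoodE E) :
    ∀ (k : Nat) (p q : List Int), pvInv E p → q ∈ pvLevFrom E k p →
      pvInv E q ∧ q.length = p.length + k := by
  intro k
  induction k with
  | zero =>
    intro p q h hq
    simp only [pvLevFrom, List.mem_singleton] at hq
    subst hq; exact ⟨h, by simp⟩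
  | succ k ih =>
    intro p q h hq
    simp only [pvLevFrom, List.mem_flatMap] at hq
    obtain ⟨q', hq', hq⟩ := hq
    obtain ⟨y, hy, hyn, rfl⟩ := pvExt_mem hE hq'
    obtain ⟨h1, h2⟩ := ih (p ++ [y]) q (pvInv_append h hy hyn) hq
    refine ⟨h1, ?_⟩
    simp only [List.length_append, List.length_singleton] at h2
    omega

theorem pvInv_edge {E : List (List Int)} (hE : pvGoodE E) {e : List Int} (he : e ∈ E) :
    pvInv E e ∧ e.length = 2 := by
  obtain ⟨a, b, rfl⟩ := hE e he
  refine ⟨⟨by simp, ?_⟩, by simp⟩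
  intro x hx
  simp only [List.drop_one, List.tail_cons, List.mem_singleton] at hx
  rw [hx]
  exact List.mem_flatMap.2 ⟨[a, b], he, by simp⟩

theorem pvLev_props {E : List (List Int)} (hE : pvGoodE E) {k : Nat} {q : List Int}
    (hq : q ∈ pvLev E E k) : pvInv E q ∧ q.length = k + 2 := by
  rw [← pvFlatMap_levFrom, List.mem_flatMap] at hq
  obtain ⟨e, he, hq⟩ := hq
  obtain ⟨hInv, hlen⟩ := pvInv_edge hE he
  obtain ⟨h1, h2⟩ := pvLevFrom_props hE k e q hInv hq
  exact ⟨h1, by omega⟩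

theorem pvLev_empty {E : List (List Int)} (hE : pvGoodE E) {k : Nat}
    (hk : (E.flatMap (fun e => e)).length ≤ k) : pvLev E E k = [] := by
  cases h : pvLev E E k with
  | nil => rfl
  | cons q t =>
    exfalso
    have hq : q ∈ pvLev E E k := by rw [h]; exact List.mem_cons_self ..
    obtain ⟨hInv, hlen⟩ := pvLev_props hE hq
    have := pvInv_length hInv
    omega

theorem pvLev_empty_mono {E : List (List Int)} {j : Nat} (h : pvLev E E j = []) :
    ∀ k, j ≤ k → pvLev E E k = [] := by
  intro k
  induction k with
  | zero => intro hj; exact (Nat.le_zero.1 hj) ▸ h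
  | succ k ih =>
    intro hj
    rcases Nat.lt_or_ge j (k+1) with hlt | hge
    · rw [pvLev_succ_back, ih (by omega)]
      rfl
    · have hj' : j = k + 1 := by omega
      exact hj' ▸ h

theorem pvDfs_succ {E : List (List Int)} (hE : pvGoodE E) (fuel : Nat) (p : List Int) :
    pvDfs E (fuel+1) p = p :: (pvExt E p).flatMap (pvDfs E fuel) := by
  simp only [pvDfs, pvExt, List.flatMap_assoc]
  congr 1
  apply pvFlatMap_congr
  intro e he
  obtain ⟨a, b, rfl⟩ := hE e he
  have h0 : (PySem.List.pyGet? [a, b] 0).getD 0 = a := by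
    simp [PySem.List.pyGet?, PySem.List.pyIdx?]
  have h1 : (PySem.List.pyGet? [a, b] 1).getD 0 = b := by
    simp [PySem.List.pyGet?, PySem.List.pyIdx?]
  rw [pvGetLast_pair, pvGetFirst_pair, h0, h1]
  simp only [pvGetLast]
  split <;> simp

theorem pvDfs_filter {E : List (List Int)} (hE : pvGoodE E) :
    ∀ (fuel : Nat) (p : List Int) (m : Nat), pvInv E p →
      (E.flatMap (fun e => e)).length + 2 ≤ p.length + fuel →
      (pvDfs E fuel p).filter (fun q => q.length == m) =
        if m < p.length then [] else pvLevFrom E (m - p.length) p := by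
  intro fuel
  induction fuel with
  | zero =>
    intro p m hInv hfuel
    exfalso
    have := pvInv_length hInv
    omega
  | succ fuel ih =>
    intro p m hInv hfuel
    rw [pvDfs_succ hE, List.filter_cons, List.filter_flatMap]
    have hmem : ∀ q ∈ pvExt E p, pvInv E q ∧ q.length = p.length + 1 := by
      intro q hq
      obtain ⟨y, hy, hyn, rfl⟩ := pvExt_mem hE hq
      exact ⟨pvInv_append hInv hy hyn, by simp⟩
    rcases Nat.lt_trichotomy m p.length with hm | hm | hm
    · have hrest : (pvExt E p).flatMap (fun q => (pvDfs E fuel q).filter (fun r => r.length == m))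
          = (pvExt E p).flatMap (fun _ => []) := by
        apply pvFlatMap_congr
        intro q hq
        obtain ⟨hq1, hq2⟩ := hmem q hq
        rw [ih q m hq1 (by omega), if_pos (by omega)]
      rw [if_neg (by simp; omega : ¬ ((p.length == m) = true))]
      rw [hrest, pvFlatMap_empty, if_pos (by omega : m < p.length)]
    · subst hm
      have hrest : (pvExt E p).flatMap
            (fun q => (pvDfs E fuel q).filter (fun r => r.length == p.length))
          = (pvExt E p).flatMap (fun _ => []) := by
        apply pvFlatMap_congr
        intro q hq
        obtain ⟨hq1, hq2⟩ := hmem q hq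
        rw [ih q p.length hq1 (by omega), if_pos (by omega)]
      rw [if_pos (by simp : ((p.length == p.length) = true))]
      rw [hrest, pvFlatMap_empty]
      rw [if_neg (by omega : ¬ p.length < p.length), Nat.sub_self]
      simp [pvLevFrom]
    · have hrest : (pvExt E p).flatMap (fun q => (pvDfs E fuel q).filter (fun r => r.length == m))
          = (pvExt E p).flatMap (pvLevFrom E (m - (p.length + 1))) := by
        apply pvFlatMap_congr
        intro q hq
        obtain ⟨hq1, hq2⟩ := hmem q hq
        rw [ih q m hq1 (by omega), if_neg (by omega), hq2]
      rw [if_neg (by simp; omega : ¬ ((p.length == m) = true))]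
      rw [hrest, if_neg (by omega : ¬ m < p.length)]
      obtain ⟨k, hk⟩ : ∃ k, m - p.length = k + 1 := ⟨m - p.length - 1, by omega⟩
      rw [hk, show m - (p.length + 1) = k from by omega]
      rfl

theorem pvFoldlMax_le {l : List (List Int)} {b : Nat} (h0 : ∀ x ∈ l, x.length ≤ b) :
    ∀ a, a ≤ b → l.foldl (fun m p => max m p.length) a ≤ b := by
  induction l with
  | nil => intro a ha; simpa using ha
  | cons p t ih =>
    intro a ha
    rw [List.foldl_cons]
    exact ih (fun x hx => h0 x (by simp [hx])) _ (max_le ha (h0 p (by simp)))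

theorem pvFoldFilter (b : Nat) : ∀ (l : List (List Int)) (res : List (List Int)),
    l.foldl (fun res p =>
      if p.length = b ∧ p ∉ res ∧ p.reverse ∉ res then res ++ [p] else res) res
      = (l.filter (fun q => q.length == b)).foldl
          (fun res i => if i ∈ res then res else if i.reverse ∈ res then res else res ++ [i]) res := by
  intro l
  induction l with
  | nil => intro res; rfl
  | cons p t ih =>
    intro res
    rw [List.foldl_cons, List.filter_cons]
    by_cases hl : p.length = b
    · rw [if_pos (by simp [hl] : ((p.length == b) = true))]
      rw [List.foldl_cons]
      have hstep : (if p.length = b ∧ p ∉ res ∧ p.reverse ∉ res then res ++ [p] else res)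
          = (if p ∈ res then res else if p.reverse ∈ res then res else res ++ [p]) := by
        split_ifs <;> tauto
      rw [hstep, ih]
    · rw [if_neg (by simp [hl] : ¬ ((p.length == b) = true))]
      rw [if_neg (by tauto : ¬ (p.length = b ∧ p ∉ res ∧ p.reverse ∉ res))]
      exact ih res

theorem connect_into_fasta_eq (reads : List (List Int)) :
    connect_into_fasta reads = connect_into_fasta_alt reads := by
  simp only [connect_into_fasta, connect_into_fasta_alt]
  rw [← pvEdgesA_eq reads]
  have hE := pvEdgesA_good reads
  by_cases hE0 : pvEdgesA reads = []
  · simp [hE0, pvLoopA, pvStepA]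
  · -- both sides compute the last nonempty BFS level, then run the same dedup fold on it
    set Ed := pvEdgesA reads with hEd
    set N := (Ed.flatMap (fun e => e)).length with hN
    have hex : ∃ k, pvLev Ed Ed k = [] := ⟨N, pvLev_empty hE (le_refl N)⟩
    have hK0 : pvLev Ed Ed (Nat.find hex) = [] := Nat.find_spec hex
    set K := Nat.find hex with hKdef
    have hKmin : ∀ j, j < K → pvLev Ed Ed j ≠ [] := fun j hj => Nat.find_min hex hj
    have hLev0 : pvLev Ed Ed 0 = Ed := rfl
    have hK1 : 1 ≤ K := by
      by_contra hcon
      have h0 : K = 0 := by omega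
      rw [h0, hLev0] at hK0
      exact hE0 hK0
    have hKN : K ≤ N := Nat.find_min' hex (pvLev_empty hE (le_refl N))
    -- the A-side loop stops at the last nonempty level, K - 1
    have hloop : ∀ (fuel s : Nat), s < K → K ≤ s + fuel →
        pvLoopA Ed (pvLev Ed Ed s) fuel = pvLev Ed Ed (K - 1) := by
      intro fuel
      induction fuel with
      | zero => intro s h1 h2; omega
      | succ fuel ih =>
        intro s h1 h2
        simp only [pvLoopA]
        rw [pvStepA_eq, ← pvLev_succ_back]
        by_cases h : pvLev Ed Ed (s+1) = []
        · rw [if_pos h]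
          have hks : K = s + 1 := by
            rcases Nat.lt_or_ge (s+1) K with hlt | hge
            · exact absurd h (hKmin _ hlt)
            · omega
          rw [show K - 1 = s from by omega]
        · rw [if_neg h]
          have hlt : s + 1 < K := by
            rcases Nat.lt_or_ge (s+1) K with hlt | hge
            · exact hlt
            · exact absurd (pvLev_empty_mono hK0 _ hge) h
          exact ih (s+1) hlt (by omega)
    have hA : pvLoopA Ed Ed (N + 2) = pvLev Ed Ed (K - 1) := by
      have h0 : pvLev Ed Ed 0 = Ed := rfl
      rw [← h0]
      exact hloop (N + 2) 0 (by omega) (by omega)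
    set allP := Ed.flatMap (fun e => pvDfs Ed (N + 2) e) with hallPdef
    -- the B-side DFS forest, filtered at each length, is the corresponding BFS level
    have hfilter : ∀ m : Nat, allP.filter (fun q => q.length == m)
        = if m < 2 then [] else pvLev Ed Ed (m - 2) := by
      intro m
      rw [hallPdef, List.filter_flatMap]
      by_cases hm : m < 2
      · rw [if_pos hm]
        have hcg : Ed.flatMap (fun e => (pvDfs Ed (N + 2) e).filter (fun q => q.length == m))
            = Ed.flatMap (fun _ => []) := by
          apply pvFlatMap_congr
          intro e he
          obtain ⟨hInv, hlen⟩ := pvInv_edge hE he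
          rw [pvDfs_filter hE (N + 2) e m hInv (by omega), if_pos (by omega)]
        rw [hcg, pvFlatMap_empty]
      · rw [if_neg hm]
        have hcg : Ed.flatMap (fun e => (pvDfs Ed (N + 2) e).filter (fun q => q.length == m))
            = Ed.flatMap (pvLevFrom Ed (m - 2)) := by
          apply pvFlatMap_congr
          intro e he
          obtain ⟨hInv, hlen⟩ := pvInv_edge hE he
          rw [pvDfs_filter hE (N + 2) e m hInv (by omega), if_neg (by omega), hlen]
        rw [hcg, pvFlatMap_levFrom]
    -- bounds on the lengths occurring in the DFS forest
    have hmemlen : ∀ q ∈ allP, 2 ≤ q.length ∧ q.length ≤ K + 1 := by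
      intro q hq
      have hq' : q ∈ allP.filter (fun r => r.length == q.length) :=
        List.mem_filter.2 ⟨hq, by simp⟩
      rw [hfilter q.length] at hq'
      have h2 : ¬ q.length < 2 := by
        intro h2
        rw [if_pos h2] at hq'
        simp at hq'
      rw [if_neg h2] at hq'
      have hlt : q.length - 2 < K := by
        by_contra hge
        rw [pvLev_empty_mono hK0 _ (by omega)] at hq'
        simp at hq'
      exact ⟨by omega, by omega⟩
    have hKfilter : allP.filter (fun q => q.length == K + 1) = pvLev Ed Ed (K - 1) := by
      rw [hfilter (K + 1), if_neg (by omega : ¬ K + 1 < 2)]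
      rw [show K + 1 - 2 = K - 1 from by omega]
    obtain ⟨q0, hq0⟩ : ∃ q, q ∈ pvLev Ed Ed (K - 1) := by
      cases h : pvLev Ed Ed (K - 1) with
      | nil => exact absurd h (hKmin _ (by omega))
      | cons a t => exact ⟨a, List.mem_cons_self ..⟩
    have hq0' : q0 ∈ allP ∧ q0.length = K + 1 := by
      rw [← hKfilter] at hq0
      have h := List.mem_filter.1 hq0
      exact ⟨h.1, by simpa using h.2⟩
    have hbest : allP.foldl (fun m p => max m p.length) 0 = K + 1 := by
      apply Nat.le_antisymm
      · exact pvFoldlMax_le (fun x hx => (hmemlen x hx).2) 0 (by omega)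
      · have h1 : allP.foldl (fun m p => max m p.length) 0 = (allP.map List.length).foldl max 0 := by
          rw [List.foldl_map]
        rw [h1]
        have h2 := (PySem.List.le_foldl_max (allP.map List.length) 0).2 q0.length
          (List.mem_map.2 ⟨q0, hq0'.1, rfl⟩)
        have h3 := hq0'.2
        omega
    rw [hA]
    simp only [hbest]
    rw [pvFoldFilter, hKfilter]

-- ===== VERDICT (by name: the statement is the Claim_ definition above) =====
theorem connect_into_fasta_spec : Claim_equal_connect_into_fasta := by
  intro reads _ _
  unfold Spec_connect_into_fasta
  exact connect_into_fasta_eq reads
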